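-- pv_equiv track=rewrite | github.com/tan-eddie/google-code-jam-2020 | round_1a/pattern_matching/pattern_matching.py | match_all
-- ===== SOURCE A (Python) =====
-- def head_match(a, b):
--     i = 0
--     j = 0
--     while i < len(a) and j < len(b):
--         if a[i] != b[j]:
--             return False
--         else:
--             i += 1
--             j += 1
--     return True
--
-- def tail_match(a, b):
--     i = len(a) - 1
--     j = len(b) - 1
--     while i >= 0 and j >= 0:
--         if a[i] != b[j]:
--             return False
--         else:
--             i -= 1
--             j -= 1
--     return True
--
-- def get_subpatterns(pattern):
--     """
--     Get subpattern such that there is always a head and tail.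
--     E.g. A*B*C gives ["A", "B", "C"],
--     *ABC gives ["", "ABC"]
--     ABC* gives ["ABC", ""]
--     A*BC* gives ["A", "BC", ""]
--     """
--     subpatterns = []
--     curr = ""
--     for c in pattern:
--         if c == "*":
--             subpatterns.append(curr)
--             curr = ""
--         else:
--             curr += c
--     subpatterns.append(curr)
--     return subpatterns
--
-- def match_all(patterns):
--     subpatterns = []
--     for p in patterns:
--         subpatterns.append(get_subpatterns(p))
--
--     # Build head.
--     head = subpatterns[0][0]
--     for s in subpatterns:
--         if len(s[0]) > len(head):
--             head = s[0]
--     for s in subpatterns: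
--         if not head_match(head, s[0]):
--             return "*"
--
--     # Build tail.
--     tail = subpatterns[0][-1]
--     for s in subpatterns:
--         if len(s[-1]) > len(tail):
--             tail = s[-1]
--     for s in subpatterns:
--         if not tail_match(tail, s[-1]):
--             return "*"
--
--     # Build middle (can be in any order).
--     middle = []
--     for s in subpatterns:
--         middle.extend(s[1:-1])
--
--     # Build the string.
--     return head + "".join([x for x in middle]) + tail
-- ===== SOURCE B (Python) =====
-- def match_all(patterns):
--     parts = [p.split('*') for p in patterns]
--
--     # Head: one incremental pass keeping the longest mutually-consistent prefix.
--     head = parts[0][0]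
--     for s in parts:
--         if head.startswith(s[0]):
--             pass
--         elif s[0].startswith(head):
--             head = s[0]
--         else:
--             return '*'
--
--     # Tail: symmetric one pass with endswith.
--     tail = parts[0][-1]
--     for s in parts:
--         if tail.endswith(s[-1]):
--             pass
--         elif s[-1].endswith(tail):
--             tail = s[-1]
--         else:
--             return '*'
--
--     middle = []
--     for s in parts:
--         middle.extend(s[1:-1])
--     return head + ''.join(middle) + tail
-- ===== Notes on version B (the rewrite author's own statement) =====
-- stated objective: simpler
-- what changed: Replaces the hand-written subpattern splitter and the two-phase per-side logic (find the longest first/last part, then validate every part with character-index loops) by p.split('*') and a single incremental fold per side that keeps the longest mutually consistent prefix/suffix via startswith/endswith, returning '*' on the first conflict; the C-implemented built-ins replace Python-level per-character loops.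
import Mathlib
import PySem

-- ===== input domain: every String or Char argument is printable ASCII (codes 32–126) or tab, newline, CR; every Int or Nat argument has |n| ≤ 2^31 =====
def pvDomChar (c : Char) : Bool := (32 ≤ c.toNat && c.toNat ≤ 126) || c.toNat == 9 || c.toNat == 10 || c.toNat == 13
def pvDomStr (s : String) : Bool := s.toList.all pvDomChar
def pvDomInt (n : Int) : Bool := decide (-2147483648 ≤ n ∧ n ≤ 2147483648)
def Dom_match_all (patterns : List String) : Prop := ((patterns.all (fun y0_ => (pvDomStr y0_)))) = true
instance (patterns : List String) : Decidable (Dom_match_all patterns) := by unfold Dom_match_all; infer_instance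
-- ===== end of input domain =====

-- B replaces A's hand-rolled splitter and per-side "find longest part, then validate each part
-- with index loops" phases by p.split('*') and ONE incremental startswith/endswith fold per side
-- (objective: simpler; same asymptotic cost).

-- ===== PORT A =====
-- while i < len(a) and j < len(b): if a[i] != b[j]: return False else i += 1; j += 1
def headMatchLoop (a b : List Char) (i j : Nat) : Bool :=
  if i < a.length ∧ j < b.length then
    if a[i]? ≠ b[j]? then false else headMatchLoop a b (i + 1) (j + 1)
  else true
termination_by a.length - i

def head_match (a b : List Char) : Bool := headMatchLoop a b 0 0

-- while i >= 0 and j >= 0: if a[i] != b[j]: return False else i -= 1; j -= 1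
def tailMatchLoop (a b : List Char) (i j : Int) : Bool :=
  if 0 ≤ i ∧ 0 ≤ j then
    if PySem.List.pyGet? a i ≠ PySem.List.pyGet? b j then false
    else tailMatchLoop a b (i - 1) (j - 1)
  else true
termination_by (i + 1).toNat
decreasing_by omega

def tail_match (a b : List Char) : Bool :=
  tailMatchLoop a b ((a.length : Int) - 1) ((b.length : Int) - 1)

-- for c in pattern: if c == "*": subpatterns.append(curr); curr = "" else curr += c; then append curr
def getSubLoop : List Char → List (List Char) → List Char → List (List Char)
  | [], subs, curr => subs ++ [curr]
  | c :: rest, subs, curr =>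
      if c = '*' then getSubLoop rest (subs ++ [curr]) []
      else getSubLoop rest subs (curr ++ [c])

def get_subpatterns (p : List Char) : List (List Char) := getSubLoop p [] []

-- s[0] / s[-1] are PySem.List.pyGet?; .getD [] never fires inside Pre_ (every subpattern list is nonempty)
def match_all (patterns : List String) : String :=
  let subpatterns := patterns.map (fun p => get_subpatterns p.toList)
  let head0 := (PySem.List.pyGet? ((PySem.List.pyGet? subpatterns 0).getD []) 0).getD []
  let head := subpatterns.foldl
    (fun h s => if ((PySem.List.pyGet? s 0).getD []).length > h.length
                then (PySem.List.pyGet? s 0).getD [] else h) head0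
  if subpatterns.all (fun s => head_match head ((PySem.List.pyGet? s 0).getD [])) then
    let tail0 := (PySem.List.pyGet? ((PySem.List.pyGet? subpatterns 0).getD []) (-1)).getD []
    let tail := subpatterns.foldl
      (fun t s => if ((PySem.List.pyGet? s (-1)).getD []).length > t.length
                  then (PySem.List.pyGet? s (-1)).getD [] else t) tail0
    if subpatterns.all (fun s => tail_match tail ((PySem.List.pyGet? s (-1)).getD [])) then
      let middle := subpatterns.foldl
        (fun m s => m ++ PySem.List.slice s (some 1) (some (-1))) ([] : List (List Char))
      String.ofList (head ++ PySem.Chars.join [] middle ++ tail)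
    else "*"
  else "*"

-- ===== PORT B =====
-- for s in parts: if head.startswith(s[0]): pass elif s[0].startswith(head): head = s[0] else: return '*'
def foldHeadLoop : List (List (List Char)) → List Char → Option (List Char)
  | [], head => some head
  | s :: rest, head =>
      if PySem.Chars.startswith head ((PySem.List.pyGet? s 0).getD []) then foldHeadLoop rest head
      else if PySem.Chars.startswith ((PySem.List.pyGet? s 0).getD []) head then
        foldHeadLoop rest ((PySem.List.pyGet? s 0).getD [])
      else none

-- symmetric pass with endswith over the last parts
def foldTailLoop : List (List (List Char)) → List Char → Option (List Char)
  | [], tail => some tail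
  | s :: rest, tail =>
      if PySem.Chars.endswith tail ((PySem.List.pyGet? s (-1)).getD []) then foldTailLoop rest tail
      else if PySem.Chars.endswith ((PySem.List.pyGet? s (-1)).getD []) tail then
        foldTailLoop rest ((PySem.List.pyGet? s (-1)).getD [])
      else none

def match_all_alt (patterns : List String) : String :=
  let parts := patterns.map (fun p => PySem.Chars.splitOn p.toList ['*'])
  match foldHeadLoop parts ((PySem.List.pyGet? ((PySem.List.pyGet? parts 0).getD []) 0).getD []) with
  | none => "*"
  | some head =>
    match foldTailLoop parts ((PySem.List.pyGet? ((PySem.List.pyGet? parts 0).getD []) (-1)).getD []) with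
    | none => "*"
    | some tail =>
      let middle := parts.foldl
        (fun m s => m ++ PySem.List.slice s (some 1) (some (-1))) ([] : List (List Char))
      String.ofList (head ++ PySem.Chars.join [] middle ++ tail)

-- ===== PRECONDITION & SPEC =====
-- Pre_ excludes only the empty pattern list, on which the Python A raises IndexError
-- (subpatterns[0][0]); B raises there too.
def Pre_match_all (patterns : List String) : Prop := patterns ≠ []
instance (patterns : List String) : Decidable (Pre_match_all patterns) := by
  unfold Pre_match_all; infer_instance

def pvWitness_match_all : List String := ["a*c*", "*b*c"]

def Spec_match_all (patterns : List String) (out : String) : Prop := out = match_all_alt patterns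
instance (patterns : List String) (out : String) : Decidable (Spec_match_all patterns out) := by
  unfold Spec_match_all; infer_instance

-- ===== CLAIM (what is proved, stated in full; the proofs are below) =====
def Claim_equal_match_all : Prop := ∀ (patterns : List String), Dom_match_all patterns →
  Pre_match_all patterns → Spec_match_all patterns (match_all patterns)

-- ===== LEMMAS AND PROOFS =====

-- simple structural splitter both subpattern computations equal
def splitStar : List Char → List (List Char)
  | [] => [[]]
  | c :: rest => if c = '*' then [] :: splitStar rest else (splitStar rest).modifyHead (c :: ·)

theorem splitStar_ne_nil (p : List Char) : splitStar p ≠ [] := by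
  cases p with
  | nil => simp [splitStar]
  | cons c rest =>
      simp only [splitStar]
      split <;> simp [List.modifyHead_eq_nil_iff, splitStar_ne_nil rest]

theorem getSubLoop_eq (p : List Char) : ∀ subs curr,
    getSubLoop p subs curr = subs ++ (splitStar p).modifyHead (curr ++ ·) := by
  induction p with
  | nil => intro subs curr; simp [getSubLoop, splitStar]
  | cons c rest ih =>
      intro subs curr
      simp only [getSubLoop, splitStar]
      obtain ⟨h, t, hh⟩ := List.exists_cons_of_ne_nil (splitStar_ne_nil rest)
      by_cases hc : c = '*'
      · simp [hc, ih, hh]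
      · simp [hc, ih, hh]

theorem get_subpatterns_eq (p : List Char) : get_subpatterns p = splitStar p := by
  have h := getSubLoop_eq p [] []
  obtain ⟨hh, t, hht⟩ := List.exists_cons_of_ne_nil (splitStar_ne_nil p)
  simpa [get_subpatterns, hht] using h

theorem splitOn_go_eq (p : List Char) : ∀ (fuel : Nat), p.length < fuel → ∀ cur acc,
    PySem.Chars.splitOn.go ['*'] fuel p cur acc
      = acc.reverse ++ (splitStar p).modifyHead (cur.reverse ++ ·) := by
  induction p with
  | nil =>
      intro fuel hf cur acc
      match fuel, hf with
      | fuel + 1, _ => simp [PySem.Chars.splitOn.go, splitStar]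
  | cons c rest ih =>
      intro fuel hf cur acc
      match fuel, hf with
      | fuel + 1, hf =>
        simp only [PySem.Chars.splitOn.go, splitStar]
        obtain ⟨h, t, hh⟩ := List.exists_cons_of_ne_nil (splitStar_ne_nil rest)
        by_cases hc : c = '*'
        · subst hc
          rw [if_pos (by simp [List.isPrefixOf])]
          have hdrop : List.drop (['*'].length) ('*' :: rest) = rest := rfl
          rw [hdrop, ih fuel (by simpa using hf) [] (cur.reverse :: acc)]
          simp [hh, List.modifyHead]
        · rw [if_neg (by simp [List.isPrefixOf, Ne.symm hc])]
          rw [if_neg hc]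
          rw [ih fuel (by simpa using hf) (c :: cur) acc]
          simp [hh]

theorem splitOn_star (p : List Char) : PySem.Chars.splitOn p ['*'] = splitStar p := by
  have h := splitOn_go_eq p (p.length + 1) (by omega) [] []
  obtain ⟨hh, t, hht⟩ := List.exists_cons_of_ne_nil (splitStar_ne_nil p)
  simpa [PySem.Chars.splitOn, hht] using h

-- characterisation of the index loops
theorem headMatchLoop_iff (a b : List Char) : ∀ k,
    (headMatchLoop a b k k = true ↔ (a.drop k <+: b.drop k ∨ b.drop k <+: a.drop k)) := by
  intro k
  induction hn : a.length - k using Nat.strong_induction_on generalizing k with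
  | _ n ih =>
    rw [headMatchLoop]
    by_cases h : k < a.length ∧ k < b.length
    · rw [if_pos h]
      have hga : a[k]? = some a[k] := List.getElem?_eq_getElem h.1
      have hgb : b[k]? = some b[k] := List.getElem?_eq_getElem h.2
      by_cases he : a[k] = b[k]
      · rw [if_neg (by simp [hga, hgb, he])]
        rw [ih (a.length - (k+1)) (by omega) (k+1) rfl,
            List.drop_eq_getElem_cons h.1, List.drop_eq_getElem_cons h.2,
            List.cons_prefix_cons, List.cons_prefix_cons, he]
        simp only [true_and]
      · rw [if_pos (by simp [hga, hgb, he])]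
        rw [List.drop_eq_getElem_cons h.1, List.drop_eq_getElem_cons h.2,
            List.cons_prefix_cons, List.cons_prefix_cons]
        simp only [Bool.false_eq_true, false_iff, not_or, not_and]
        exact ⟨fun hx => absurd hx he, fun hx => absurd hx.symm he⟩
    · rw [if_neg h]
      rcases not_and_or.mp h with h1 | h1
      · have : a.drop k = [] := List.drop_eq_nil_of_le (by omega)
        simp [this]
      · have : b.drop k = [] := List.drop_eq_nil_of_le (by omega)
        simp [this]

theorem head_match_iff (a b : List Char) :
    head_match a b = true ↔ (a <+: b ∨ b <+: a) := by
  simpa using headMatchLoop_iff a b 0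

theorem tailMatchLoop_eq (a b : List Char) : ∀ k : Nat,
    tailMatchLoop a b ((a.length : Int) - 1 - k) ((b.length : Int) - 1 - k)
      = headMatchLoop a.reverse b.reverse k k := by
  intro k
  induction hn : a.length - k using Nat.strong_induction_on generalizing k with
  | _ n ih =>
    rw [tailMatchLoop, headMatchLoop]
    by_cases h : k < a.length ∧ k < b.length
    · have hc1 : 0 ≤ (a.length : Int) - 1 - k ∧ 0 ≤ (b.length : Int) - 1 - k := by
        obtain ⟨h1, h2⟩ := h; constructor <;> omega
      have hrev : k < a.reverse.length ∧ k < b.reverse.length := by simpa using h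
      rw [if_pos hc1, if_pos hrev]
      have hga : PySem.List.pyGet? a ((a.length : Int) - 1 - k) = a.reverse[k]? := by
        rw [show ((a.length : Int) - 1 - k) = ((a.length - 1 - k : Nat) : Int) from by omega,
          PySem.List.pyGet?_natCast, List.getElem?_reverse h.1]
      have hgb : PySem.List.pyGet? b ((b.length : Int) - 1 - k) = b.reverse[k]? := by
        rw [show ((b.length : Int) - 1 - k) = ((b.length - 1 - k : Nat) : Int) from by omega,
          PySem.List.pyGet?_natCast, List.getElem?_reverse h.2]
      rw [hga, hgb]
      by_cases he : a.reverse[k]? = b.reverse[k]?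
      · rw [if_neg (not_not_intro he), if_neg (not_not_intro he)]
        rw [show (a.length : Int) - 1 - k - 1 = (a.length : Int) - 1 - (k+1 : Nat) from by push_cast; ring]
        rw [show (b.length : Int) - 1 - k - 1 = (b.length : Int) - 1 - (k+1 : Nat) from by push_cast; ring]
        exact ih (a.length - (k+1)) (by omega) (k+1) rfl
      · rw [if_pos he, if_pos he]
    · have hc1 : ¬ (0 ≤ (a.length : Int) - 1 - k ∧ 0 ≤ (b.length : Int) - 1 - k) := by
        rcases not_and_or.mp h with h1 | h1
        · intro hx; exact h1 (by omega)
        · intro hx; exact h1 (by omega)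
      rw [if_neg hc1, if_neg (by simpa using h)]

theorem tail_match_iff (a b : List Char) :
    tail_match a b = true ↔ (a <:+ b ∨ b <:+ a) := by
  have h := tailMatchLoop_eq a b 0
  simp only [Nat.cast_zero, sub_zero] at h
  rw [tail_match, h, show headMatchLoop a.reverse b.reverse 0 0 = head_match a.reverse b.reverse from rfl,
    head_match_iff]
  simp [List.reverse_prefix]

-- first / last part extraction
def fpart (s : List (List Char)) : List Char := (PySem.List.pyGet? s 0).getD []
def lpart (s : List (List Char)) : List Char := (PySem.List.pyGet? s (-1)).getD []

theorem fpart_def (s : List (List Char)) : (PySem.List.pyGet? s 0).getD [] = fpart s := rfl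
theorem lpart_def (s : List (List Char)) : (PySem.List.pyGet? s (-1)).getD [] = lpart s := rfl

-- A's longest-part fold, abstracted
def amax (l : List (List Char)) (h : List Char) : List Char :=
  l.foldl (fun h s => if s.length > h.length then s else h) h

theorem amax_nil (h : List Char) : amax [] h = h := rfl

theorem amax_cons (s : List Char) (l : List (List Char)) (h : List Char) :
    amax (s :: l) h = amax l (if s.length > h.length then s else h) := rfl

theorem le_amax (l : List (List Char)) (h : List Char) : h.length ≤ (amax l h).length := by
  induction l generalizing h with
  | nil => simp [amax_nil]
  | cons s rest ih =>
      rw [amax_cons]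
      refine le_trans ?_ (ih _)
      split <;> omega

theorem mem_le_amax (l : List (List Char)) (h : List Char) :
    ∀ x ∈ l, x.length ≤ (amax l h).length := by
  induction l generalizing h with
  | nil => simp
  | cons s rest ih =>
      intro x hx
      rw [amax_cons]
      rcases List.mem_cons.mp hx with rfl | hx
      · refine le_trans ?_ (le_amax _ _)
        split <;> omega
      · exact ih _ x hx

-- B's fold in terms of fpart
theorem foldHeadLoop_cons (s : List (List Char)) (rest : List (List (List Char))) (h : List Char) :
    foldHeadLoop (s :: rest) h =
      (if fpart s <+: h then foldHeadLoop rest h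
       else if h <+: fpart s then foldHeadLoop rest (fpart s) else none) := by
  rw [foldHeadLoop]
  simp only [fpart_def]
  by_cases h1 : fpart s <+: h
  · rw [if_pos ((PySem.Chars.startswith_iff _ _).mpr h1), if_pos h1]
  · rw [if_neg (by simpa [PySem.Chars.startswith_iff] using h1), if_neg h1]
    by_cases h2 : h <+: fpart s
    · rw [if_pos ((PySem.Chars.startswith_iff _ _).mpr h2), if_pos h2]
    · rw [if_neg (by simpa [PySem.Chars.startswith_iff] using h2), if_neg h2]

theorem foldTailLoop_cons (s : List (List Char)) (rest : List (List (List Char))) (t : List Char) :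
    foldTailLoop (s :: rest) t =
      (if lpart s <:+ t then foldTailLoop rest t
       else if t <:+ lpart s then foldTailLoop rest (lpart s) else none) := by
  rw [foldTailLoop]
  simp only [lpart_def]
  by_cases h1 : lpart s <:+ t
  · rw [if_pos ((PySem.Chars.endswith_iff _ _).mpr h1), if_pos h1]
  · rw [if_neg (by simpa [PySem.Chars.endswith_iff] using h1), if_neg h1]
    by_cases h2 : t <:+ lpart s
    · rw [if_pos ((PySem.Chars.endswith_iff _ _).mpr h2), if_pos h2]
    · rw [if_neg (by simpa [PySem.Chars.endswith_iff] using h2), if_neg h2]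

theorem foldHeadLoop_some_eq_amax (l : List (List (List Char))) (h m : List Char)
    (hb : foldHeadLoop l h = some m) : m = amax (l.map fpart) h := by
  induction l generalizing h with
  | nil => simp [foldHeadLoop] at hb; simp [amax_nil, hb]
  | cons s rest ih =>
      rw [foldHeadLoop_cons] at hb
      rw [List.map_cons, amax_cons]
      by_cases h1 : fpart s <+: h
      · rw [if_pos h1] at hb
        rw [if_neg (by have := h1.length_le; omega)]
        exact ih h hb
      · rw [if_neg h1] at hb
        by_cases h2 : h <+: fpart s
        · rw [if_pos h2] at hb
          have hlt : h.length < (fpart s).length := by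
            rcases lt_or_eq_of_le h2.length_le with hl | hl
            · exact hl
            · exact absurd (h2.eq_of_length_le (by omega) ▸ List.prefix_refl _) h1
          rw [if_pos hlt]
          exact ih _ hb
        · rw [if_neg h2] at hb; exact absurd hb (by simp)

theorem foldHeadLoop_some_prefix (l : List (List (List Char))) (h m : List Char)
    (hb : foldHeadLoop l h = some m) : h <+: m ∧ ∀ s ∈ l, fpart s <+: m := by
  induction l generalizing h with
  | nil => simp [foldHeadLoop] at hb; simp [hb]
  | cons s rest ih =>
      rw [foldHeadLoop_cons] at hb
      by_cases h1 : fpart s <+: h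
      · rw [if_pos h1] at hb
        obtain ⟨hm, hall⟩ := ih h hb
        exact ⟨hm, by intro x hx; rcases List.mem_cons.mp hx with rfl | hx
                      exacts [h1.trans hm, hall x hx]⟩
      · rw [if_neg h1] at hb
        by_cases h2 : h <+: fpart s
        · rw [if_pos h2] at hb
          obtain ⟨hm, hall⟩ := ih _ hb
          exact ⟨h2.trans hm, by intro x hx; rcases List.mem_cons.mp hx with rfl | hx
                                 exacts [hm, hall x hx]⟩
        · rw [if_neg h2] at hb; exact absurd hb (by simp)

theorem foldHeadLoop_some_of_all_prefix (l : List (List (List Char))) (h M : List Char)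
    (hh : h <+: M) (hall : ∀ s ∈ l, fpart s <+: M) : ∃ m, foldHeadLoop l h = some m := by
  induction l generalizing h with
  | nil => exact ⟨h, rfl⟩
  | cons s rest ih =>
      rw [foldHeadLoop_cons]
      have hs : fpart s <+: M := hall s (by simp)
      rcases List.prefix_or_prefix_of_prefix hs hh with h1 | h1
      · rw [if_pos h1]
        exact ih h hh (fun x hx => hall x (List.mem_cons_of_mem _ hx))
      · by_cases h0 : fpart s <+: h
        · rw [if_pos h0]
          exact ih h hh (fun x hx => hall x (List.mem_cons_of_mem _ hx))
        · rw [if_neg h0, if_pos h1]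
          exact ih (fpart s) hs (fun x hx => hall x (List.mem_cons_of_mem _ hx))

theorem foldTailLoop_some_eq_amax (l : List (List (List Char))) (t m : List Char)
    (hb : foldTailLoop l t = some m) : m = amax (l.map lpart) t := by
  induction l generalizing t with
  | nil => simp [foldTailLoop] at hb; simp [amax_nil, hb]
  | cons s rest ih =>
      rw [foldTailLoop_cons] at hb
      rw [List.map_cons, amax_cons]
      by_cases h1 : lpart s <:+ t
      · rw [if_pos h1] at hb
        rw [if_neg (by have := h1.length_le; omega)]
        exact ih t hb
      · rw [if_neg h1] at hb
        by_cases h2 : t <:+ lpart s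
        · rw [if_pos h2] at hb
          have hlt : t.length < (lpart s).length := by
            rcases lt_or_eq_of_le h2.length_le with hl | hl
            · exact hl
            · exact absurd (h2.eq_of_length_le (by omega) ▸ List.suffix_refl _) h1
          rw [if_pos hlt]
          exact ih _ hb
        · rw [if_neg h2] at hb; exact absurd hb (by simp)

theorem foldTailLoop_some_suffix (l : List (List (List Char))) (t m : List Char)
    (hb : foldTailLoop l t = some m) : t <:+ m ∧ ∀ s ∈ l, lpart s <:+ m := by
  induction l generalizing t with
  | nil => simp [foldTailLoop] at hb; simp [hb]
  | cons s rest ih =>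
      rw [foldTailLoop_cons] at hb
      by_cases h1 : lpart s <:+ t
      · rw [if_pos h1] at hb
        obtain ⟨hm, hall⟩ := ih t hb
        exact ⟨hm, by intro x hx; rcases List.mem_cons.mp hx with rfl | hx
                      exacts [h1.trans hm, hall x hx]⟩
      · rw [if_neg h1] at hb
        by_cases h2 : t <:+ lpart s
        · rw [if_pos h2] at hb
          obtain ⟨hm, hall⟩ := ih _ hb
          exact ⟨h2.trans hm, by intro x hx; rcases List.mem_cons.mp hx with rfl | hx
                                 exacts [hm, hall x hx]⟩
        · rw [if_neg h2] at hb; exact absurd hb (by simp)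

theorem foldTailLoop_some_of_all_suffix (l : List (List (List Char))) (t M : List Char)
    (ht : t <:+ M) (hall : ∀ s ∈ l, lpart s <:+ M) : ∃ m, foldTailLoop l t = some m := by
  induction l generalizing t with
  | nil => exact ⟨t, rfl⟩
  | cons s rest ih =>
      rw [foldTailLoop_cons]
      have hs : lpart s <:+ M := hall s (by simp)
      rcases List.suffix_or_suffix_of_suffix hs ht with h1 | h1
      · rw [if_pos h1]
        exact ih t ht (fun x hx => hall x (List.mem_cons_of_mem _ hx))
      · by_cases h0 : lpart s <:+ t
        · rw [if_pos h0]
          exact ih t ht (fun x hx => hall x (List.mem_cons_of_mem _ hx))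
        · rw [if_neg h0, if_pos h1]
          exact ih (lpart s) hs (fun x hx => hall x (List.mem_cons_of_mem _ hx))

-- A's inline folds / checks in terms of fpart / lpart / amax
theorem foldA_head (l : List (List (List Char))) (h0 : List Char) :
    l.foldl (fun h s => if ((PySem.List.pyGet? s 0).getD []).length > h.length
                        then (PySem.List.pyGet? s 0).getD [] else h) h0
      = amax (l.map fpart) h0 := by
  rw [amax, List.foldl_map]; rfl

theorem foldA_tail (l : List (List (List Char))) (t0 : List Char) :
    l.foldl (fun t s => if ((PySem.List.pyGet? s (-1)).getD []).length > t.length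
                        then (PySem.List.pyGet? s (-1)).getD [] else t) t0
      = amax (l.map lpart) t0 := by
  rw [amax, List.foldl_map]; rfl

-- A's body / B's body over an already-computed subpattern list (definitionally equal to the ports)
def Ahead (l : List (List (List Char))) : List Char :=
  l.foldl (fun h s => if ((PySem.List.pyGet? s 0).getD []).length > h.length
                      then (PySem.List.pyGet? s 0).getD [] else h)
    ((PySem.List.pyGet? ((PySem.List.pyGet? l 0).getD []) 0).getD [])

def Atail (l : List (List (List Char))) : List Char :=
  l.foldl (fun t s => if ((PySem.List.pyGet? s (-1)).getD []).length > t.length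
                      then (PySem.List.pyGet? s (-1)).getD [] else t)
    ((PySem.List.pyGet? ((PySem.List.pyGet? l 0).getD []) (-1)).getD [])

def Abody (l : List (List (List Char))) : String :=
  if l.all (fun s => head_match (Ahead l) ((PySem.List.pyGet? s 0).getD [])) then
    if l.all (fun s => tail_match (Atail l) ((PySem.List.pyGet? s (-1)).getD [])) then
      String.ofList (Ahead l
        ++ PySem.Chars.join [] (l.foldl (fun m s => m ++ PySem.List.slice s (some 1) (some (-1))) [])
        ++ Atail l)
    else "*"
  else "*"

def Bbody (l : List (List (List Char))) : String :=
  match foldHeadLoop l ((PySem.List.pyGet? ((PySem.List.pyGet? l 0).getD []) 0).getD []) with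
  | none => "*"
  | some head =>
    match foldTailLoop l ((PySem.List.pyGet? ((PySem.List.pyGet? l 0).getD []) (-1)).getD []) with
    | none => "*"
    | some tail =>
      String.ofList (head
        ++ PySem.Chars.join [] (l.foldl (fun m s => m ++ PySem.List.slice s (some 1) (some (-1))) [])
        ++ tail)

theorem match_all_eq_Abody (patterns : List String) :
    match_all patterns = Abody (patterns.map (fun p => get_subpatterns p.toList)) := rfl

theorem match_all_alt_eq_Bbody (patterns : List String) :
    match_all_alt patterns = Bbody (patterns.map (fun p => PySem.Chars.splitOn p.toList ['*'])) := rfl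

theorem bodies_eq (s0 : List (List Char)) (rest : List (List (List Char))) :
    Abody (s0 :: rest) = Bbody (s0 :: rest) := by
  have hs0 : (PySem.List.pyGet? (s0 :: rest) 0).getD [] = s0 := by
    simp [PySem.List.pyGet?, PySem.List.pyIdx?]
  have hmem0 : s0 ∈ s0 :: rest := List.mem_cons_self
  have hAhead : Ahead (s0 :: rest) = amax ((s0 :: rest).map fpart) (fpart s0) := by
    rw [Ahead, foldA_head, hs0, fpart_def]
  have hAtail : Atail (s0 :: rest) = amax ((s0 :: rest).map lpart) (lpart s0) := by
    rw [Atail, foldA_tail, hs0, lpart_def]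
  cases hbf : foldHeadLoop (s0 :: rest) (fpart s0) with
  | none =>
      have hex : ∃ s ∈ s0 :: rest, ¬ fpart s <+: amax ((s0 :: rest).map fpart) (fpart s0) := by
        by_contra hx
        push Not at hx
        obtain ⟨m, hm⟩ := foldHeadLoop_some_of_all_prefix (s0 :: rest) (fpart s0)
          (amax ((s0 :: rest).map fpart) (fpart s0)) (hx s0 hmem0) hx
        rw [hbf] at hm; cases hm
      obtain ⟨s, hsmem, hnp⟩ := hex
      have hfalse : (s0 :: rest).all
          (fun s => head_match (Ahead (s0 :: rest)) (fpart s)) = false := by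
        rw [List.all_eq_false]
        refine ⟨s, hsmem, ?_⟩
        rw [hAhead, Bool.not_eq_true]
        rw [← Bool.not_eq_true]
        intro htr
        rcases (head_match_iff _ _).mp htr with hc | hc
        · have hle := mem_le_amax ((s0 :: rest).map fpart) (fpart s0) (fpart s)
            (List.mem_map_of_mem hsmem)
          exact hnp (hc.eq_of_length_le hle ▸ List.prefix_refl _)
        · exact hnp hc
      simp only [Abody, Bbody, hs0, fpart_def, hfalse, hbf, Bool.false_eq_true, if_false]
  | some m =>
      have hm := foldHeadLoop_some_eq_amax (s0 :: rest) (fpart s0) m hbf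
      obtain ⟨hh0m, hallm⟩ := foldHeadLoop_some_prefix (s0 :: rest) (fpart s0) m hbf
      have htrue : (s0 :: rest).all
          (fun s => head_match (Ahead (s0 :: rest)) (fpart s)) = true := by
        rw [List.all_eq_true]
        intro s hsm
        rw [hAhead, ← hm]
        exact (head_match_iff _ _).mpr (Or.inr (hallm s hsm))
      cases hbt : foldTailLoop (s0 :: rest) (lpart s0) with
      | none =>
          have hex : ∃ s ∈ s0 :: rest, ¬ lpart s <:+ amax ((s0 :: rest).map lpart) (lpart s0) := by
            by_contra hx
            push Not at hx
            obtain ⟨w, hw⟩ := foldTailLoop_some_of_all_suffix (s0 :: rest) (lpart s0)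
              (amax ((s0 :: rest).map lpart) (lpart s0)) (hx s0 hmem0) hx
            rw [hbt] at hw; cases hw
          obtain ⟨s, hsmem, hns⟩ := hex
          have hfalse : (s0 :: rest).all
              (fun s => tail_match (Atail (s0 :: rest)) (lpart s)) = false := by
            rw [List.all_eq_false]
            refine ⟨s, hsmem, ?_⟩
            rw [hAtail, Bool.not_eq_true]
            rw [← Bool.not_eq_true]
            intro htr
            rcases (tail_match_iff _ _).mp htr with hc | hc
            · have hle := mem_le_amax ((s0 :: rest).map lpart) (lpart s0) (lpart s)
                (List.mem_map_of_mem hsmem)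
              exact hns (hc.eq_of_length_le hle ▸ List.suffix_refl _)
            · exact hns hc
          simp only [Abody, Bbody, hs0, fpart_def, lpart_def, htrue, hfalse, hbf, hbt,
            Bool.false_eq_true, if_true, if_false]
      | some w =>
          have hw := foldTailLoop_some_eq_amax (s0 :: rest) (lpart s0) w hbt
          obtain ⟨ht0w, hallw⟩ := foldTailLoop_some_suffix (s0 :: rest) (lpart s0) w hbt
          have httrue : (s0 :: rest).all
              (fun s => tail_match (Atail (s0 :: rest)) (lpart s)) = true := by
            rw [List.all_eq_true]
            intro s hsm
            rw [hAtail, ← hw]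
            exact (tail_match_iff _ _).mpr (Or.inr (hallw s hsm))
          simp only [Abody, Bbody, hs0, fpart_def, lpart_def, htrue, httrue, hbf, hbt, if_true]
          rw [hAhead, ← hm, hAtail, ← hw]

-- ===== VERDICT (by name: the statement is the Claim_ definition above) =====
theorem match_all_spec : Claim_equal_match_all := by
  intro patterns _ hpre
  unfold Spec_match_all
  obtain ⟨q, qs, rfl⟩ := List.exists_cons_of_ne_nil hpre
  rw [match_all_eq_Abody, match_all_alt_eq_Bbody,
    show (q :: qs).map (fun p => get_subpatterns p.toList)
        = (q :: qs).map (fun p => PySem.Chars.splitOn p.toList ['*']) from by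
      simp [get_subpatterns_eq, splitOn_star],
    List.map_cons]
  exact bodies_eq _ _
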